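-- pv_equiv track=rewrite | github.com/carneirodrigo/automator | engine/work/toon_adapter.py | _homogeneous_keys
-- ===== SOURCE A (Python) =====
-- def _homogeneous_keys(arr: list) -> list[str] | None:
--     """Return shared keys if all elements are dicts with identical key sets."""
--     if not arr or not all(isinstance(x, dict) for x in arr):
--         return None
--     if not arr[0]:
--         return None
--     keys = list(arr[0].keys())
--     key_set = set(keys)
--     if all(set(d.keys()) == key_set for d in arr):
--         return keys
--     return None
-- ===== SOURCE B (Python) =====
-- def _homogeneous_keys(arr: list) -> list[str] | None:
--     """Return shared keys if all elements are dicts with identical key sets."""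
--     if not arr or not all(isinstance(x, dict) for x in arr):
--         return None
--     counts = {}
--     for d in arr:
--         for k in d:
--             counts[k] = counts.get(k, 0) + 1
--     n = len(arr)
--     if counts and all(c == n for c in counts.values()):
--         return list(arr[0].keys())
--     return None
-- ===== Notes on version B (the rewrite author's own statement) =====
-- stated objective: alternative
-- what changed: B aggregates one global key-occurrence counter over all dicts and accepts iff the counter is non-empty and every key's count equals len(arr), instead of A's build-reference-key-set-then-compare-each-dict's-set strategy.
import Mathlib
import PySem

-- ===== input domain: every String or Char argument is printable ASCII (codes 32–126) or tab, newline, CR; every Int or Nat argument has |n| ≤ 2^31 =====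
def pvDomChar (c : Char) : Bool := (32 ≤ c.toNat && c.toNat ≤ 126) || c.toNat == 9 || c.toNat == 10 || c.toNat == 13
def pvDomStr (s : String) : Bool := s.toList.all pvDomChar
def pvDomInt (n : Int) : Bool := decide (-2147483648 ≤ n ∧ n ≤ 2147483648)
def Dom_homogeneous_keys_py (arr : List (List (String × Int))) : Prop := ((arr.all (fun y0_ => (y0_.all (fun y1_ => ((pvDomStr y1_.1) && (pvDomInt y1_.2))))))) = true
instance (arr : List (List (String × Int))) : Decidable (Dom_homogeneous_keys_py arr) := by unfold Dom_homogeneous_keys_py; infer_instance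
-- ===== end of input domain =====

-- B replaces A's build-reference-key-set-then-compare-each-dict strategy by one global
-- key-occurrence counter over all dicts, accepting iff it is non-empty and every count = len(arr). (alternative)

-- keys of a dict given as an association list: distinct keys, first-occurrence order (list(d.keys()) / 'for k in d')
def pvKeys (d : List (String × Int)) : List String := PySem.List.dedup (d.map Prod.fst)

-- ===== PORT A =====
-- 'all(isinstance(x, dict) for x in arr)' is always true under the type convention (every element is a dict)
def homogeneous_keys_py (arr : List (List (String × Int))) : Option (List String) :=
  match arr with
  | [] => none
  | d0 :: _ =>
    if d0.isEmpty then none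
    else
      let keys := pvKeys d0
      let key_set := PySem.Set.ofList keys
      if arr.all (fun d => PySem.Set.equal (PySem.Set.ofList (pvKeys d)) key_set) then some keys
      else none

-- ===== PORT B =====
def homogeneous_keys_py_alt (arr : List (List (String × Int))) : Option (List String) :=
  match arr with
  | [] => none
  | d0 :: _ =>
    -- counts[k] = counts.get(k, 0) + 1 over every key of every dict
    let counts := arr.foldl
      (fun c d => (pvKeys d).foldl (fun c k => c.insert k (c.getD k 0 + 1)) c)
      (PySem.Dict.empty : PySem.Dict String Int)
    let n : Int := arr.length
    if counts.size != 0 && counts.values.all (fun c => c == n) then some (pvKeys d0)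
    else none

-- ===== PRECONDITION & SPEC =====
def Spec_homogeneous_keys_py (arr : List (List (String × Int))) (out : Option (List String)) : Prop := out = homogeneous_keys_py_alt arr
instance (arr : List (List (String × Int))) (out : Option (List String)) : Decidable (Spec_homogeneous_keys_py arr out) := by unfold Spec_homogeneous_keys_py; infer_instance

-- ===== CLAIM =====
def Claim_equal_homogeneous_keys_py : Prop := ∀ (arr : List (List (String × Int))), Dom_homogeneous_keys_py arr → Spec_homogeneous_keys_py arr (homogeneous_keys_py arr)

-- ===== LEMMAS AND PROOFS =====

-- B's nested counting loop is the counter of the flattened key lists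
theorem pvCounts_eq (arr : List (List (String × Int))) :
    arr.foldl
      (fun c d => (pvKeys d).foldl (fun c k => c.insert k (c.getD k 0 + 1)) c)
      (PySem.Dict.empty : PySem.Dict String Int)
      = PySem.Dict.counter (arr.flatMap pvKeys) := by
  rw [← PySem.Dict.foldl_insert_getD_add_one_eq_counter, List.foldl_flatMap]

-- each dict's key list is duplicate-free, so occurrences in the flattened list count dicts
theorem pvCount_flat (arr : List (List (String × Int))) (k : String) :
    (arr.flatMap pvKeys).count k = arr.countP (fun d => decide (k ∈ pvKeys d)) := by
  induction arr with
  | nil => rfl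
  | cons d rest ih =>
    simp only [List.flatMap_cons, List.count_append, List.countP_cons, ih]
    by_cases h : k ∈ pvKeys d
    · rw [List.count_eq_one_of_mem (by simp [pvKeys]) h]
      simp [h]; omega
    · rw [List.count_eq_zero.mpr h]
      simp [h]

theorem homogeneous_keys_py_spec : Claim_equal_homogeneous_keys_py := by
  intro arr _
  unfold Spec_homogeneous_keys_py
  match arr with
  | [] => rfl
  | d0 :: rest =>
    unfold homogeneous_keys_py homogeneous_keys_py_alt
    simp only [pvCounts_eq]
    -- names for the flattened keys and the dict count
    set K := (d0 :: rest).flatMap pvKeys with hK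
    have hvals : (PySem.Dict.counter K).values
        = (PySem.Set.ofList K).map (fun k => ((K.count k : Nat) : Int)) := by
      simp [PySem.Dict.values, PySem.Dict.items_counter]
    have hsize : (PySem.Dict.counter K).size = (PySem.Set.ofList K).length := by
      simp [PySem.Dict.size, PySem.Dict.items_counter]
    -- B's boolean condition, propositionally
    have hB : ((PySem.Dict.counter K).size != 0
          && (PySem.Dict.counter K).values.all (fun c => c == ((d0 :: rest).length : Int))) = true
        ↔ (K ≠ [] ∧ ∀ k ∈ K, ∀ d ∈ d0 :: rest, k ∈ pvKeys d) := by
      rw [Bool.and_eq_true, hvals, hsize]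
      constructor
      · rintro ⟨h1, h2⟩
        simp only [bne_iff_ne, ne_eq, List.length_eq_zero_iff] at h1
        have hKne : K ≠ [] := by
          intro h; apply h1; rw [h]; rfl
        refine ⟨hKne, fun k hk d hd => ?_⟩
        have hk' : k ∈ PySem.Set.ofList K := by
          rw [PySem.Set.mem_ofList]; exact hk
        have := List.all_eq_true.mp h2 _ (List.mem_map_of_mem hk')
        simp only [beq_iff_eq, Nat.cast_inj] at this
        rw [pvCount_flat] at this
        have := List.countP_eq_length.mp this d hd
        simpa using this
      · rintro ⟨h1, h2⟩
        constructor
        · simp only [bne_iff_ne, ne_eq, List.length_eq_zero_iff]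
          intro h
          rcases List.exists_mem_of_ne_nil K h1 with ⟨k, hk⟩
          have : k ∈ PySem.Set.ofList K := by rw [PySem.Set.mem_ofList]; exact hk
          rw [h] at this; exact (List.not_mem_nil this)
        · rw [List.all_eq_true]
          rintro c hc
          rcases List.mem_map.mp hc with ⟨k, hk, rfl⟩
          rw [PySem.Set.mem_ofList] at hk
          simp only [beq_iff_eq, Nat.cast_inj]
          rw [hK, pvCount_flat]
          exact List.countP_eq_length.mpr (fun d hd => decide_eq_true (h2 k hk d hd))
      -- A's boolean condition, propositionally
    have hset : ∀ d : List (String × Int), PySem.Set.ofList (pvKeys d) = pvKeys d :=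
      fun d => PySem.Set.ofList_eq_self_of_nodup _ (by simp [pvKeys])
    have hA : (¬ d0.isEmpty = true ∧ ((d0 :: rest).all
          (fun d => PySem.Set.equal (PySem.Set.ofList (pvKeys d)) (PySem.Set.ofList (pvKeys d0)))) = true)
        ↔ (K ≠ [] ∧ ∀ k ∈ K, ∀ d ∈ d0 :: rest, k ∈ pvKeys d) := by
      simp only [List.all_eq_true, hset]
      constructor
      · rintro ⟨h0, heq⟩
        have hmem : ∀ d ∈ d0 :: rest, ∀ x, x ∈ pvKeys d ↔ x ∈ pvKeys d0 :=
          fun d hd x => by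
            have := (PySem.Set.equal_iff (pvKeys d) (pvKeys d0)).mp (heq d hd) x
            exact this
        constructor
        · rcases List.exists_mem_of_ne_nil d0 (by simpa [List.isEmpty_iff] using h0) with ⟨p, hp⟩
          intro h
          have : p.1 ∈ K := by
            rw [hK]; exact List.mem_flatMap.mpr ⟨d0, List.mem_cons_self, by
              simp [pvKeys]; exact ⟨p.2, hp⟩⟩
          rw [h] at this; exact List.not_mem_nil this
        · intro k hk d hd
          rcases List.mem_flatMap.mp (hK ▸ hk) with ⟨d', hd', hkd'⟩
          exact (hmem d hd k).mpr ((hmem d' hd' k).mp hkd')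
      · rintro ⟨h1, h2⟩
        have hd0 : ∀ k ∈ K, k ∈ pvKeys d0 := fun k hk => h2 k hk d0 List.mem_cons_self
        rcases List.exists_mem_of_ne_nil K h1 with ⟨k0, hk0⟩
        constructor
        · intro h
          have := hd0 k0 hk0
          rw [List.isEmpty_iff] at h
          simp [pvKeys, h] at this
        · intro d hd
          rw [PySem.Set.equal_iff]
          intro x
          constructor
          · intro hx
            have hxK : x ∈ K := by
              rw [hK]; exact List.mem_flatMap.mpr ⟨d, hd, by exact hx⟩
            exact hd0 x hxK
          · intro hx
            have hxK : x ∈ K := by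
              rw [hK]; exact List.mem_flatMap.mpr ⟨d0, List.mem_cons_self, by exact hx⟩
            exact h2 x hxK d hd
    -- combine
    by_cases hb : ((PySem.Dict.counter K).size != 0
        && (PySem.Dict.counter K).values.all (fun c => c == ((d0 :: rest).length : Int))) = true
    · obtain ⟨hne, hall⟩ := hA.mpr (hB.mp hb)
      rw [if_pos hb, if_neg hne, if_pos hall]
    · rw [if_neg hb]
      by_cases h0 : d0.isEmpty = true
      · rw [if_pos h0]
      · rw [if_neg h0]
        by_cases hc : ((d0 :: rest).all
            (fun d => PySem.Set.equal (PySem.Set.ofList (pvKeys d)) (PySem.Set.ofList (pvKeys d0)))) = true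
        · exact absurd (hB.mpr (hA.mp ⟨h0, hc⟩)) hb
        · rw [if_neg hc]
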